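-- pv_equiv track=rewrite | github.com/wesleyd/aoc16 | day02a.py | move1
-- ===== SOURCE A (Python) =====
-- from typing import List, Optional, Tuple
--
-- KEYPAD = """
-- 123
-- 456
-- 789
-- """.strip().splitlines()
--
-- def find(n: int|str) -> Optional[Tuple[int, int]]:
--     for row, r in enumerate(KEYPAD):
--         for col, c in enumerate(r):
--             if int(c) == int(n):
--                 return (row, col)
--
-- def clamp(n, b):
--     if n < 0:
--         return 0
--     if n > b:
--         return b
--     return n
--
-- def move1(path: str, n: int|str = 5) -> str:
--     row, col = find(n)
--     for d in path:
--         match d: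
--             case 'U':
--                 row -= 1
--             case 'D':
--                 row += 1
--             case 'L':
--                 col -= 1
--             case 'R':
--                 col += 1
--         row = clamp(row, len(KEYPAD)-1)
--         col = clamp(col, len(KEYPAD[0])-1)
--     return KEYPAD[row][col]
-- ===== SOURCE B (Python) =====
-- def _table():
--     grid = ["123", "456", "789"]
--     t = {}
--     for r in range(3):
--         for c in range(3):
--             for d, (dr, dc) in (('U', (-1, 0)), ('D', (1, 0)), ('L', (0, -1)), ('R', (0, 1))):
--                 nr = min(max(r + dr, 0), 2)
--                 nc = min(max(c + dc, 0), 2)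
--                 t[(grid[r][c], d)] = grid[nr][nc]
--     return t
--
-- _TABLE = _table()
--
-- def move1(path: str, n: int | str = 5) -> str:
--     cur = str(n)
--     for d in path:
--         cur = _TABLE.get((cur, d), cur)
--     return cur
-- ===== Notes on version B (the rewrite author's own statement) =====
-- stated objective: idiomatic
-- what changed: Replaces per-step coordinate arithmetic with clamping by a transition table precomputed once from the 3x3 grid; move1 just walks the path with dict lookups on the current digit, unknown directions falling back to the current digit.
import Mathlib
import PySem

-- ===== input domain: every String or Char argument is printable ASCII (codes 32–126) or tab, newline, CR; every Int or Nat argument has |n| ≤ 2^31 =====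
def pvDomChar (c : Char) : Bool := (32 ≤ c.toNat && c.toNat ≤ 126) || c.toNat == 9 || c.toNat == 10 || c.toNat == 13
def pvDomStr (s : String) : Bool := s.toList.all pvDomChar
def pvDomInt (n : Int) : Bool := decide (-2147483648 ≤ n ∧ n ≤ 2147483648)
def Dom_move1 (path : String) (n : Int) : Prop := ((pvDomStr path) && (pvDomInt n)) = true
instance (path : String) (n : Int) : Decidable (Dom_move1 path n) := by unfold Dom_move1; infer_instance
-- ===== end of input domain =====

-- B replaces per-step coordinate arithmetic + clamping by a transition table precomputed
-- once from the grid; move1 then walks the path by table lookups on the current digit (idiomatic).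

-- ===== PORT A =====
def pvKeypad : List String := PySem.Str.splitlines (PySem.Str.strip "\n123\n456\n789\n")

def pvFindCols (row : Int) (cs : List (Int × Char)) (n : Int) : Option (Int × Int) :=
  match cs with
  | [] => none
  | (col, c) :: rest =>
      if PySem.Int.ofStr? (String.ofList [c]) = some n then some (row, col)
      else pvFindCols row rest n

def pvFindRows (rs : List (Int × String)) (n : Int) : Option (Int × Int) :=
  match rs with
  | [] => none
  | (row, r) :: rest =>
      match pvFindCols row (PySem.List.enumerate r.toList 0) n with
      | some p => some p
      | none => pvFindRows rest n

def pvFind (n : Int) : Option (Int × Int) := pvFindRows (PySem.List.enumerate pvKeypad 0) n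

def pvClamp (x b : Int) : Int := if x < 0 then 0 else if x > b then b else x

def pvStepA (st : Int × Int) (d : Char) : Int × Int :=
  let p : Int × Int :=
    if d = 'U' then (st.1 - 1, st.2)
    else if d = 'D' then (st.1 + 1, st.2)
    else if d = 'L' then (st.1, st.2 - 1)
    else if d = 'R' then (st.1, st.2 + 1)
    else (st.1, st.2)
  (pvClamp p.1 ((pvKeypad.length : Int) - 1),
   pvClamp p.2 (PySem.Str.len (PySem.List.pyGetD pvKeypad 0 "") - 1))

-- KEYPAD[row][col] (row, col always in range after clamping; .getD "" is never hit on Pre_)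
def pvKeyAt (r c : Int) : String :=
  String.ofList [(PySem.Str.pyGet? (PySem.List.pyGetD pvKeypad r "") c).getD ' ']

def move1 (path : String) (n : Int) : String :=
  match pvFind n with
  | none => ""   -- Python raises TypeError here (unpacking None); excluded by Pre_move1
  | some (row, col) =>
      let st := path.toList.foldl pvStepA (row, col)
      pvKeyAt st.1 st.2

-- ===== PORT B =====
def pvGrid : List String := ["123", "456", "789"]

def pvDirs : List (Char × (Int × Int)) := [('U', (-1, 0)), ('D', (1, 0)), ('L', (0, -1)), ('R', (0, 1))]

def pvGridAt (r c : Int) : String :=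
  String.ofList [(PySem.Str.pyGet? (PySem.List.pyGetD pvGrid r "") c).getD ' ']

def pvTable : PySem.Dict (String × Char) String :=
  (PySem.List.pyRange 0 3 1).foldl (fun t r =>
    (PySem.List.pyRange 0 3 1).foldl (fun t c =>
      pvDirs.foldl (fun t dp =>
        let nr := min (max (r + dp.2.1) 0) 2
        let nc := min (max (c + dp.2.2) 0) 2
        t.insert (pvGridAt r c, dp.1) (pvGridAt nr nc)) t) t)
    PySem.Dict.empty

def move1_alt (path : String) (n : Int) : String :=
  path.toList.foldl (fun cur d => pvTable.getD (cur, d) cur) (PySem.Int.toStr n)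

-- ===== PRECONDITION & SPEC =====
-- Pre_ excludes n outside 1..9: there find() returns None and Python A raises TypeError unpacking it.
def Pre_move1 (path : String) (n : Int) : Prop := 1 ≤ n ∧ n ≤ 9
instance (path : String) (n : Int) : Decidable (Pre_move1 path n) := by unfold Pre_move1; infer_instance
def pvWitness_move1 : String × Int := ("ULL", 5)

def Spec_move1 (path : String) (n : Int) (out : String) : Prop := out = move1_alt path n
instance (path : String) (n : Int) (out : String) : Decidable (Spec_move1 path n out) := by unfold Spec_move1; infer_instance

-- ===== CLAIM (what is proved, stated in full; the proofs are below) =====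
def Claim_equal_move1 : Prop := ∀ (path : String) (n : Int), Dom_move1 path n → Pre_move1 path n → Spec_move1 path n (move1 path n)

-- ===== LEMMAS AND PROOFS =====

lemma pvLenRows : (pvKeypad.length : Int) - 1 = 2 := by decide

lemma pvLenRow0 : PySem.Str.len (PySem.List.pyGetD pvKeypad 0 "") - 1 = 2 := by decide

lemma pvStepA_bounds (st : Int × Int) (d : Char) :
    0 ≤ (pvStepA st d).1 ∧ (pvStepA st d).1 ≤ 2 ∧ 0 ≤ (pvStepA st d).2 ∧ (pvStepA st d).2 ≤ 2 := by
  simp only [pvStepA, pvLenRows, pvLenRow0, pvClamp]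
  split_ifs <;> simp_all <;> omega

set_option maxRecDepth 8000 in
lemma pvTable_dirs : ∀ k ∈ pvTable.keys, k.2 = 'U' ∨ k.2 = 'D' ∨ k.2 = 'L' ∨ k.2 = 'R' := by decide

lemma pvStepA_other (r c : Int) (d : Char) (h0 : 0 ≤ r) (h1 : r ≤ 2) (h2 : 0 ≤ c) (h3 : c ≤ 2)
    (hU : d ≠ 'U') (hD : d ≠ 'D') (hL : d ≠ 'L') (hR : d ≠ 'R') :
    pvStepA (r, c) d = (r, c) := by
  simp only [pvStepA, pvLenRows, pvLenRow0, hU, hD, hL, hR, if_false]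
  rw [Prod.mk.injEq]
  constructor <;> (simp only [pvClamp]; split_ifs <;> omega)

set_option maxRecDepth 8000 in
lemma pvStep_sim (r c : Int) (h0 : 0 ≤ r) (h1 : r ≤ 2) (h2 : 0 ≤ c) (h3 : c ≤ 2) (d : Char) :
    pvTable.getD (pvKeyAt r c, d) (pvKeyAt r c) = pvKeyAt (pvStepA (r, c) d).1 (pvStepA (r, c) d).2 := by
  by_cases hU : d = 'U'
  · subst hU; interval_cases r <;> interval_cases c <;> decide
  by_cases hD : d = 'D'
  · subst hD; interval_cases r <;> interval_cases c <;> decide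
  by_cases hL : d = 'L'
  · subst hL; interval_cases r <;> interval_cases c <;> decide
  by_cases hR : d = 'R'
  · subst hR; interval_cases r <;> interval_cases c <;> decide
  · rw [pvStepA_other r c d h0 h1 h2 h3 hU hD hL hR]
    have hc : pvTable.contains (pvKeyAt r c, d) = false := by
      rw [PySem.Dict.contains_eq_decide_mem_keys]
      simp only [decide_eq_false_iff_not]
      intro hmem
      rcases pvTable_dirs _ hmem with h | h | h | h <;> simp at h <;> contradiction
    exact PySem.Dict.getD_of_not_contains _ _ hc

lemma pvFold_sim (cs : List Char) :
    ∀ (r c : Int), 0 ≤ r → r ≤ 2 → 0 ≤ c → c ≤ 2 →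
    cs.foldl (fun cur d => pvTable.getD (cur, d) cur) (pvKeyAt r c)
      = pvKeyAt (cs.foldl pvStepA (r, c)).1 (cs.foldl pvStepA (r, c)).2 := by
  induction cs with
  | nil => intro r c _ _ _ _; rfl
  | cons d rest ih =>
      intro r c h0 h1 h2 h3
      simp only [List.foldl_cons]
      rw [pvStep_sim r c h0 h1 h2 h3 d]
      obtain ⟨b0, b1, b2, b3⟩ := pvStepA_bounds (r, c) d
      have := ih (pvStepA (r, c) d).1 (pvStepA (r, c) d).2 b0 b1 b2 b3
      simpa using this

lemma pvStart (n : Int) (h1 : 1 ≤ n) (h9 : n ≤ 9) :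
    ∃ r c, pvFind n = some (r, c) ∧ 0 ≤ r ∧ r ≤ 2 ∧ 0 ≤ c ∧ c ≤ 2 ∧
      PySem.Int.toStr n = pvKeyAt r c := by
  interval_cases n
  · exact ⟨0, 0, by decide, by decide, by decide, by decide, by decide, by decide⟩
  · exact ⟨0, 1, by decide, by decide, by decide, by decide, by decide, by decide⟩
  · exact ⟨0, 2, by decide, by decide, by decide, by decide, by decide, by decide⟩
  · exact ⟨1, 0, by decide, by decide, by decide, by decide, by decide, by decide⟩
  · exact ⟨1, 1, by decide, by decide, by decide, by decide, by decide, by decide⟩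
  · exact ⟨1, 2, by decide, by decide, by decide, by decide, by decide, by decide⟩
  · exact ⟨2, 0, by decide, by decide, by decide, by decide, by decide, by decide⟩
  · exact ⟨2, 1, by decide, by decide, by decide, by decide, by decide, by decide⟩
  · exact ⟨2, 2, by decide, by decide, by decide, by decide, by decide, by decide⟩

-- ===== VERDICT (by name: the statement is the Claim_ definition above) =====
theorem move1_spec : Claim_equal_move1 := by
  intro path n _ hpre
  obtain ⟨h1, h9⟩ := hpre
  obtain ⟨r, c, hf, b0, b1, b2, b3, hs⟩ := pvStart n h1 h9
  unfold Spec_move1 move1 move1_alt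
  rw [hf, hs]
  exact (pvFold_sim path.toList r c b0 b1 b2 b3).symm
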